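-- pv_equiv track=rewrite | github.com/abc1199281/repo-lantern | src/lantern_cli/core/agentic_planner.py | _fallback_layer_groups
-- ===== SOURCE A (Python) =====
-- def _fallback_layer_groups(
--     file_list: list[str],
--     layers: dict[str, int],
--     batch_size: int,
-- ) -> list[list[str]]:
--     """Fall back to layer-based grouping (same as Architect)."""
--     layer_groups: dict[int, list[str]] = {}
--     for f in file_list:
--         idx = layers.get(f, 0)
--         if idx not in layer_groups:
--             layer_groups[idx] = []
--         layer_groups[idx].append(f)
--
--     result: list[list[str]] = []
--     for idx in sorted(layer_groups.keys()):
--         files = sorted(layer_groups[idx])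
--         for i in range(0, len(files), batch_size):
--             result.append(files[i : i + batch_size])
--     return result
-- ===== SOURCE B (Python) =====
-- def _fallback_layer_groups(
--     file_list: list[str],
--     layers: dict[str, int],
--     batch_size: int,
-- ) -> list[list[str]]:
--     """One global stable sort (names, then layer), then batch each equal-layer run."""
--     ordered = sorted(sorted(file_list), key=lambda f: layers.get(f, 0))
--     result: list[list[str]] = []
--     rest = ordered
--     while rest:
--         k = layers.get(rest[0], 0)
--         j = 1
--         while j < len(rest) and layers.get(rest[j], 0) == k:
--             j += 1
--         run, rest = rest[:j], rest[j:]
--         for i in range(0, len(run), batch_size):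
--             result.append(run[i : i + batch_size])
--     return result
-- ===== Notes on version B (the rewrite author's own statement) =====
-- stated objective: alternative
-- what changed: Replaces A's grouping dict plus per-key sorting by ONE global stable sort of file_list (by name, then by layer) followed by a single linear scan that cuts the sorted list into equal-layer runs and slices each run into batches; no dict and no per-layer sort remain.
import Mathlib
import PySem

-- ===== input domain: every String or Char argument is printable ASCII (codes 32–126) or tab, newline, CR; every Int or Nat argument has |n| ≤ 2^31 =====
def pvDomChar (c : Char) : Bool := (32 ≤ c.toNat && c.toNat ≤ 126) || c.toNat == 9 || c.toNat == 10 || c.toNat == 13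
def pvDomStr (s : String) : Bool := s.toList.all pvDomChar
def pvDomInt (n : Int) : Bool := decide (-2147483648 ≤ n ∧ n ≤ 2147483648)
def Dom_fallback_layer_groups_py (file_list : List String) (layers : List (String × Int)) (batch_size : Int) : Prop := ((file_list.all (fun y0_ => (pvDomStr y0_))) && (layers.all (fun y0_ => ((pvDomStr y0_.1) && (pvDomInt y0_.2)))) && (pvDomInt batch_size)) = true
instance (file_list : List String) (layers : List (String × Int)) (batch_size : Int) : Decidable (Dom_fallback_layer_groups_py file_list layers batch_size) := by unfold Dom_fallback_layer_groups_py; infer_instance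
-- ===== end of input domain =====

-- B replaces A's grouping dict and per-layer sorts by one global stable sort (name, then layer) followed by a linear run-splitting scan; alternative decomposition, same result.


-- ===== PORT A =====
-- literal port of A: one-pass grouping dict, then sorted keys, sorted buckets, batch slices
def fallback_layer_groups_py (file_list : List String) (layers : List (String × Int)) (batch_size : Int) : List (List String) :=
  let L := PySem.Dict.mk layers
  let layer_groups : PySem.Dict Int (List String) :=
    file_list.foldl (fun d f =>
      let idx := L.getD f 0
      let d := if d.contains idx then d else d.insert idx ([] : List String)
      d.insert idx (d.getD idx [] ++ [f])) PySem.Dict.empty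
  (PySem.List.sorted layer_groups.keys (fun x => x) false).foldl (fun result idx =>
    let files := PySem.List.sorted (layer_groups.getD idx []) (fun x => x) false
    (PySem.List.pyRange 0 (files.length : Int) batch_size).foldl
      (fun result i => result ++ [PySem.List.slice files (some i) (some (i + batch_size))]) result) []

-- ===== PORT B =====
-- literal port of B's while-loop: cut the ordered list into maximal equal-layer runs, batch each run
def pvBatchRuns (key : String → Int) (bs : Int) : List String → List (List String)
  | [] => []
  | f :: rest =>
      (PySem.List.pyRange 0 (((f :: rest.takeWhile (fun g => key g == key f)).length : Nat) : Int) bs).map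
        (fun i => PySem.List.slice (f :: rest.takeWhile (fun g => key g == key f)) (some i) (some (i + bs)))
      ++ pvBatchRuns key bs (rest.dropWhile (fun g => key g == key f))
  termination_by l => l.length
  decreasing_by simpa using Nat.lt_succ_of_le (List.length_dropWhile_le _ _)

-- literal port of B: one global stable sort (by name, then stable by layer), then run-splitting scan
def fallback_layer_groups_py_alt (file_list : List String) (layers : List (String × Int)) (batch_size : Int) : List (List String) :=
  let L := PySem.Dict.mk layers
  let ordered := PySem.List.sorted (PySem.List.sorted file_list (fun x => x) false) (fun f => L.getD f 0) false
  pvBatchRuns (fun f => L.getD f 0) batch_size ordered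

-- ===== PRECONDITION & SPEC =====
-- Pre_ excludes exactly the inputs where A raises: batch_size = 0 with a nonempty file_list makes range(0, n, 0) raise ValueError.
def Pre_fallback_layer_groups_py (file_list : List String) (layers : List (String × Int)) (batch_size : Int) : Prop :=
  batch_size ≠ 0 ∨ file_list = []
instance (file_list : List String) (layers : List (String × Int)) (batch_size : Int) : Decidable (Pre_fallback_layer_groups_py file_list layers batch_size) := by unfold Pre_fallback_layer_groups_py; infer_instance
def pvWitness_fallback_layer_groups_py : List String × (List (String × Int)) × Int := (["a", "b", "c"], [("a", 1), ("c", 2)], 2)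

def Spec_fallback_layer_groups_py (file_list : List String) (layers : List (String × Int)) (batch_size : Int) (out : List (List String)) : Prop := out = fallback_layer_groups_py_alt file_list layers batch_size
instance (file_list : List String) (layers : List (String × Int)) (batch_size : Int) (out : List (List String)) : Decidable (Spec_fallback_layer_groups_py file_list layers batch_size out) := by unfold Spec_fallback_layer_groups_py; infer_instance

-- ===== CLAIM (what is proved, stated in full; the proofs are below) =====
def Claim_equal_fallback_layer_groups_py : Prop := ∀ (file_list : List String) (layers : List (String × Int)) (batch_size : Int), Dom_fallback_layer_groups_py file_list layers batch_size → Pre_fallback_layer_groups_py file_list layers batch_size → Spec_fallback_layer_groups_py file_list layers batch_size (fallback_layer_groups_py file_list layers batch_size)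

-- ===== LEMMAS AND PROOFS =====

-- batches of one run (proof-side abbreviation for the slice loop)
def pvBatches (bs : Int) (run : List String) : List (List String) :=
  (PySem.List.pyRange 0 ((run.length : Nat) : Int) bs).map
    (fun i => PySem.List.slice run (some i) (some (i + bs)))

-- insertion of a key into a sorted key list (proof-side model of where insertBy puts a new key)
def pvInsKey (k : Int) : List Int → List Int
  | [] => [k]
  | k0 :: kt => if k < k0 then k :: k0 :: kt else if k = k0 then k0 :: kt else k0 :: pvInsKey k kt

-- A's dict step (ensure-key then append) is Dict.modify
theorem pvStepEqModify (d : PySem.Dict Int (List String)) (idx : Int) (f : String) :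
    (let d' := if d.contains idx then d else d.insert idx ([] : List String);
     d'.insert idx (d'.getD idx [] ++ [f])) = d.modify idx [] (· ++ [f]) := by
  by_cases h : d.contains idx
  · simp [h, PySem.Dict.modify]
  · simp [h, PySem.Dict.modify, PySem.Dict.insert_insert_self, PySem.Dict.getD_insert_self,
      PySem.Dict.getD_of_not_contains d ([] : List String) (by simpa using h)]

-- the grouping dict's keys are the distinct layer indices, in first-occurrence order
theorem pvKeysEq (file_list : List String) (key : String → Int) :
    (file_list.foldl (fun d f => d.modify (key f) ([] : List String) (· ++ [f]))
      PySem.Dict.empty).keys = PySem.Set.ofList (file_list.map key) := by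
  rw [PySem.Dict.keys_foldl_modify_key file_list key ([] : List String) (fun _ x => (· ++ [x]))]
  simp [PySem.Set.update, PySem.Set.ofList_eq_foldl, PySem.Dict.keys_empty]

-- the grouping dict's bucket at c is the filter of file_list at c
theorem pvGetDEq (file_list : List String) (key : String → Int) (c : Int) :
    (file_list.foldl (fun d f => d.modify (key f) ([] : List String) (· ++ [f]))
      PySem.Dict.empty).getD c [] = file_list.filter (fun f => key f == c) := by
  have h : file_list.foldl (fun d f => d.modify (key f) ([] : List String) (· ++ [f]))
      PySem.Dict.empty
      = (file_list.map (fun f => (key f, f))).foldl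
          (fun d p => d.modify p.1 ([] : List String) (· ++ [p.2])) PySem.Dict.empty := by
    rw [List.foldl_map]
  rw [h, PySem.Dict.getD_foldl_modify_append, List.filter_map]
  simp [Function.comp_def]

-- A in flatMap form: per sorted distinct key, batches of the sorted bucket
theorem pvA_eq (file_list : List String) (layers : List (String × Int)) (batch_size : Int) :
    fallback_layer_groups_py file_list layers batch_size
      = (PySem.List.sorted (PySem.Set.ofList
            (file_list.map (fun f => (PySem.Dict.mk layers).getD f 0))) (fun x => x) false).flatMap
          (fun k => pvBatches batch_size
            (PySem.List.sorted
              (file_list.filter (fun f => (PySem.Dict.mk layers).getD f 0 == k)) (fun x => x) false)) := by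
  unfold fallback_layer_groups_py
  have hstep : (fun (d : PySem.Dict Int (List String)) f =>
      let idx := (PySem.Dict.mk layers).getD f 0
      let d' := if d.contains idx then d else d.insert idx ([] : List String)
      d'.insert idx (d'.getD idx [] ++ [f]))
      = fun d f => d.modify ((PySem.Dict.mk layers).getD f 0) [] (· ++ [f]) := by
    funext d f
    exact pvStepEqModify d ((PySem.Dict.mk layers).getD f 0) f
  simp only [hstep, pvKeysEq file_list (fun f => (PySem.Dict.mk layers).getD f 0),
    pvGetDEq file_list (fun f => (PySem.Dict.mk layers).getD f 0),
    PySem.List.foldl_append_singleton_eq_map, PySem.List.foldl_append_eq_flatMap]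
  simp [pvBatches]

-- flatMap respects pointwise equality on members
theorem pvFlatMapCongr {α β : Type} (l : List α) (f g : α → List β)
    (h : ∀ a ∈ l, f a = g a) : l.flatMap f = l.flatMap g := by
  induction l with
  | nil => rfl
  | cons a t ih => simp only [List.flatMap_cons, h a (by simp), ih (fun a ha => h a (by simp [ha]))]

-- insertBy skips a prefix it never inserts before
theorem pvInsertBy_append (before : String → String → Bool) (x : String) (pre suf : List String)
    (h : ∀ p ∈ pre, before x p = false) :
    PySem.List.insertBy before x (pre ++ suf) = pre ++ PySem.List.insertBy before x suf := by
  induction pre with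
  | nil => simp
  | cons a t ih =>
      simp only [List.cons_append, PySem.List.insertBy.eq_2, h a (by simp)]
      simp [ih (fun p hp => h p (by simp [hp]))]

-- inserting one element into a key-blocked list lands at the end of its key block
theorem pvInsertBlocks (key : String → Int) (y : String) (ks : List Int) (B : Int → List String)
    (hks : ks.Pairwise (· < ·))
    (hkey : ∀ k ∈ ks, ∀ x ∈ B k, key x = k)
    (hne : ∀ k ∈ ks, B k ≠ [])
    (habs : key y ∉ ks → B (key y) = []) :
    PySem.List.insertBy (fun a b => decide (key a < key b)) y (ks.flatMap B)
      = (pvInsKey (key y) ks).flatMap (fun k => if k = key y then B k ++ [y] else B k) := by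
  induction ks with
  | nil =>
      simp only [List.flatMap_nil, PySem.List.insertBy.eq_1, pvInsKey, List.flatMap_cons,
        List.flatMap_nil, List.append_nil]
      rw [habs (by simp)]
      simp
  | cons k0 kt ih =>
      rcases List.pairwise_cons.mp hks with ⟨h0, ht⟩
      obtain ⟨f, fs, hB0⟩ : ∃ f fs, B k0 = f :: fs := by
        cases h : B k0 with
        | nil => exact absurd h (hne k0 (by simp))
        | cons a t => exact ⟨a, t, rfl⟩
      have hkf : key f = k0 := hkey k0 (by simp) f (by rw [hB0]; simp)
      rcases lt_trichotomy (key y) k0 with hlt | heq | hgt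
      · have hcongt : ∀ k ∈ kt, (if k = key y then B k ++ [y] else B k) = B k := by
          intro k hk
          have := h0 k hk
          rw [if_neg (show ¬ k = key y by omega)]
        have hnotin : key y ∉ k0 :: kt := by
          intro hmem
          rcases List.mem_cons.mp hmem with h | h
          · omega
          · have := h0 _ h; omega
        rw [List.flatMap_cons, hB0, List.cons_append, PySem.List.insertBy.eq_2,
          if_pos (by simp only [hkf, decide_eq_true_eq]; omega)]
        simp only [pvInsKey, if_pos hlt]
        rw [List.flatMap_cons, if_pos rfl, habs hnotin, List.nil_append, List.flatMap_cons,
          if_neg (by omega), pvFlatMapCongr kt _ _ hcongt, hB0]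
        simp
      · have hpre : ∀ p ∈ B k0, (fun a b => decide (key a < key b)) y p = false := by
          intro p hp
          have hkp : key p = k0 := hkey k0 (by simp) p hp
          simp only [hkp, heq, decide_eq_false_iff_not]
          omega
        rw [List.flatMap_cons, pvInsertBy_append _ _ _ _ hpre]
        have htail : PySem.List.insertBy (fun a b => decide (key a < key b)) y (kt.flatMap B)
            = y :: kt.flatMap B := by
          cases hkt : kt with
          | nil => simp [PySem.List.insertBy.eq_1]
          | cons k1 kt' =>
              obtain ⟨g, gs, hB1⟩ : ∃ g gs, B k1 = g :: gs := by
                cases h : B k1 with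
                | nil => exact absurd h (hne k1 (by simp [hkt]))
                | cons a t => exact ⟨a, t, rfl⟩
              have hkg : key g = k1 := hkey k1 (by simp [hkt]) g (by rw [hB1]; simp)
              have hk01 : k0 < k1 := h0 k1 (by simp [hkt])
              rw [List.flatMap_cons, hB1, List.cons_append, PySem.List.insertBy.eq_2,
                if_pos (by simp only [hkg, heq, decide_eq_true_eq]; omega)]
        rw [htail]
        have hcongt : ∀ k ∈ kt, (if k = key y then B k ++ [y] else B k) = B k := by
          intro k hk
          have := h0 k hk
          rw [if_neg (show ¬ k = key y by omega)]
        have hkeq : pvInsKey (key y) (k0 :: kt) = k0 :: kt := by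
          simp only [pvInsKey]
          rw [if_neg (show ¬ key y < k0 by omega), if_pos heq]
        rw [hkeq, List.flatMap_cons, if_pos heq.symm, pvFlatMapCongr kt _ _ hcongt]
        simp
      · have hpre : ∀ p ∈ B k0, (fun a b => decide (key a < key b)) y p = false := by
          intro p hp
          have hkp : key p = k0 := hkey k0 (by simp) p hp
          simp only [hkp, decide_eq_false_iff_not]
          omega
        rw [List.flatMap_cons, pvInsertBy_append _ _ _ _ hpre,
          ih ht (fun k hk => hkey k (by simp [hk])) (fun k hk => hne k (by simp [hk]))
            (fun hk => habs (by simp only [List.mem_cons, not_or]; exact ⟨by omega, hk⟩))]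
        have hkeq : pvInsKey (key y) (k0 :: kt) = k0 :: pvInsKey (key y) kt := by
          simp only [pvInsKey]
          rw [if_neg (show ¬ key y < k0 by omega), if_neg (show ¬ key y = k0 by omega)]
        rw [hkeq, List.flatMap_cons, if_neg (show ¬ k0 = key y by omega)]

-- pvInsKey membership / order / perm facts
theorem pvInsKey_mem (k a : Int) (ks : List Int) : a ∈ pvInsKey k ks ↔ a = k ∨ a ∈ ks := by
  induction ks with
  | nil => simp [pvInsKey]
  | cons k0 kt ih =>
      simp only [pvInsKey]
      split_ifs with h1 h2
      · simp only [List.mem_cons]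
      · subst h2; simp [List.mem_cons]
      · simp only [List.mem_cons, ih]; tauto

theorem pvInsKey_pairwise (k : Int) (ks : List Int) (h : ks.Pairwise (· < ·)) :
    (pvInsKey k ks).Pairwise (· < ·) := by
  induction ks with
  | nil => simp [pvInsKey]
  | cons k0 kt ih =>
      rcases List.pairwise_cons.mp h with ⟨h0, ht⟩
      simp only [pvInsKey]
      split_ifs with h1 h2
      · refine List.pairwise_cons.mpr ⟨?_, h⟩
        intro a ha
        rcases List.mem_cons.mp ha with rfl | ha
        · exact h1
        · exact lt_trans h1 (h0 a ha)
      · exact h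
      · refine List.pairwise_cons.mpr ⟨?_, ih ht⟩
        intro a ha
        rcases (pvInsKey_mem k a kt).mp ha with rfl | ha
        · omega
        · exact h0 a ha

theorem pvInsKey_perm (k : Int) (ks : List Int) (h : k ∉ ks) :
    (pvInsKey k ks).Perm (k :: ks) := by
  induction ks with
  | nil => simp [pvInsKey]
  | cons k0 kt ih =>
      simp only [pvInsKey]
      split_ifs with h1 h2
      · exact List.Perm.refl _
      · exact absurd (by simp [h2]) h
      · exact ((ih (fun hk => h (by simp [hk]))).cons k0).trans (List.Perm.swap k k0 kt)

theorem pvInsKey_id (k : Int) (ks : List Int) (hks : ks.Pairwise (· < ·)) (h : k ∈ ks) :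
    pvInsKey k ks = ks := by
  induction ks with
  | nil => simp at h
  | cons k0 kt ih =>
      rcases List.pairwise_cons.mp hks with ⟨h0, ht⟩
      simp only [pvInsKey]
      rcases List.mem_cons.mp h with rfl | h
      · simp
      · have := h0 k h
        rw [if_neg (by omega), if_neg (by omega), ih ht h]

-- appending one element extends the sorted distinct-key list by pvInsKey
theorem pvSortedKeys_append (key : String → Int) (ys : List String) (y : String) :
    PySem.List.sorted (PySem.Set.ofList ((ys ++ [y]).map key)) (fun x => x) false
      = pvInsKey (key y) (PySem.List.sorted (PySem.Set.ofList (ys.map key)) (fun x => x) false) := by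
  have hof : PySem.Set.ofList ((ys ++ [y]).map key)
      = PySem.Set.add (PySem.Set.ofList (ys.map key)) (key y) := by
    simp [PySem.Set.ofList_eq_foldl, List.foldl_append]
  rw [hof]
  by_cases hc : key y ∈ PySem.Set.ofList (ys.map key)
  · have hadd : PySem.Set.add (PySem.Set.ofList (ys.map key)) (key y)
        = PySem.Set.ofList (ys.map key) := by
      simp [PySem.Set.add, PySem.Set.contains, hc]
    rw [hadd]
    exact (pvInsKey_id _ _ (PySem.List.sorted_ofList_pairwise_lt (ys.map key))
      ((PySem.List.mem_sorted _ _ _ _).mpr hc)).symm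
  · have hadd : PySem.Set.add (PySem.Set.ofList (ys.map key)) (key y)
        = PySem.Set.ofList (ys.map key) ++ [key y] := by
      simp [PySem.Set.add, PySem.Set.contains, hc]
    rw [hadd]
    refine PySem.List.sorted_eq_of_perm_of_pairwise_lt _ _ _ ?_ ?_
    · refine ((pvInsKey_perm _ _ ?_).trans ?_)
      · intro hmem
        exact hc ((PySem.List.mem_sorted _ _ _ _).mp hmem)
      · exact ((PySem.List.sorted_perm _ _ _).cons (key y)).trans
          (List.perm_append_singleton (key y) _).symm
    · exact pvInsKey_pairwise _ _ (PySem.List.sorted_ofList_pairwise_lt (ys.map key))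

-- STABILITY: a stable key-sort is the concatenation, in ascending key order, of the key-filters
theorem pvStable (key : String → Int) (ys : List String) :
    PySem.List.sorted ys key false
      = (PySem.List.sorted (PySem.Set.ofList (ys.map key)) (fun x => x) false).flatMap
          (fun k => ys.filter (fun f => key f == k)) := by
  induction ys using List.reverseRecOn with
  | nil => simp [PySem.List.sorted, PySem.Set.ofList]
  | append_singleton ys y ih =>
      have hfold : PySem.List.sorted (ys ++ [y]) key false
          = PySem.List.insertBy (fun a b => decide (key a < key b)) y
              (PySem.List.sorted ys key false) := by
        rw [PySem.List.sorted_eq_foldl_insertBy, PySem.List.sorted_eq_foldl_insertBy,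
          List.foldl_append, List.foldl_cons, List.foldl_nil]
      rw [hfold, ih,
        pvInsertBlocks key y _ _ (PySem.List.sorted_ofList_pairwise_lt (ys.map key))
          (fun k _ x hx => by
            have := List.mem_filter.mp hx
            exact by simpa using this.2)
          (fun k hk => by
            have hk' : k ∈ ys.map key :=
              (PySem.Set.mem_ofList _ _).mp ((PySem.List.mem_sorted _ _ _ _).mp hk)
            obtain ⟨f, hf, hfk⟩ := List.mem_map.mp hk'
            exact List.ne_nil_of_mem (List.mem_filter.mpr ⟨hf, by simp [hfk]⟩))
          (fun hk => by
            rw [List.filter_eq_nil_iff]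
            intro f hf hfk
            have : key f = key y := by simpa using hfk
            exact hk ((PySem.List.mem_sorted _ _ _ _).mpr
              ((PySem.Set.mem_ofList _ _).mpr (List.mem_map.mpr ⟨f, hf, this⟩)))),
        pvSortedKeys_append key ys y]
      refine pvFlatMapCongr _ _ _ ?_
      intro k _
      by_cases hk : k = key y
      · subst hk
        simp [List.filter_append]
      · have hky : (key y == k) = false := by simp; omega
        simp [List.filter_append, if_neg hk, hky]

-- takeWhile / dropWhile across a prefix that wholly satisfies the predicate
theorem pvTakeAll {α : Type} (p : α → Bool) (pre suf : List α)
    (h : ∀ x ∈ pre, p x = true) :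
    (pre ++ suf).takeWhile p = pre ++ suf.takeWhile p := by
  induction pre with
  | nil => simp
  | cons a t ih =>
      rw [List.cons_append, List.takeWhile_cons, if_pos (h a (by simp)),
        ih (fun x hx => h x (by simp [hx])), List.cons_append]

theorem pvDropAll {α : Type} (p : α → Bool) (pre suf : List α)
    (h : ∀ x ∈ pre, p x = true) :
    (pre ++ suf).dropWhile p = suf.dropWhile p := by
  induction pre with
  | nil => simp
  | cons a t ih =>
      rw [List.cons_append, List.dropWhile_cons, if_pos (h a (by simp)),
        ih (fun x hx => h x (by simp [hx]))]

-- the run-splitting scan of a key-blocked list batches each block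
theorem pvBatchRuns_flat (key : String → Int) (bs : Int) (ks : List Int) (B : Int → List String)
    (hks : ks.Pairwise (· < ·))
    (hkey : ∀ k ∈ ks, ∀ x ∈ B k, key x = k)
    (hne : ∀ k ∈ ks, B k ≠ []) :
    pvBatchRuns key bs (ks.flatMap B) = ks.flatMap (fun k => pvBatches bs (B k)) := by
  induction ks with
  | nil => simp [pvBatchRuns]
  | cons k0 kt ih =>
      rcases List.pairwise_cons.mp hks with ⟨h0, ht⟩
      obtain ⟨f, fs, hB0⟩ : ∃ f fs, B k0 = f :: fs := by
        cases h : B k0 with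
        | nil => exact absurd h (hne k0 (by simp))
        | cons a t => exact ⟨a, t, rfl⟩
      have hkf : key f = k0 := hkey k0 (by simp) f (by rw [hB0]; simp)
      have hall : ∀ x ∈ fs, (fun g => key g == key f) x = true := by
        intro x hx
        have : key x = k0 := hkey k0 (by simp) x (by rw [hB0]; simp [hx])
        simp [this, hkf]
      have htw0 : (kt.flatMap B).takeWhile (fun g => key g == key f) = [] := by
        cases hkt : kt with
        | nil => simp
        | cons k1 kt' =>
            obtain ⟨g, gs, hB1⟩ : ∃ g gs, B k1 = g :: gs := by
              cases h : B k1 with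
              | nil => exact absurd h (hne k1 (by simp [hkt]))
              | cons a t => exact ⟨a, t, rfl⟩
            have hkg : key g = k1 := hkey k1 (by simp [hkt]) g (by rw [hB1]; simp)
            have hk01 : k0 < k1 := h0 k1 (by simp [hkt])
            rw [List.flatMap_cons, hB1, List.cons_append, List.takeWhile_cons,
              if_neg (by simp [hkg, hkf]; omega)]
      have hdw0 : (kt.flatMap B).dropWhile (fun g => key g == key f) = kt.flatMap B := by
        cases hkt : kt with
        | nil => simp
        | cons k1 kt' =>
            obtain ⟨g, gs, hB1⟩ : ∃ g gs, B k1 = g :: gs := by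
              cases h : B k1 with
              | nil => exact absurd h (hne k1 (by simp [hkt]))
              | cons a t => exact ⟨a, t, rfl⟩
            have hkg : key g = k1 := hkey k1 (by simp [hkt]) g (by rw [hB1]; simp)
            have hk01 : k0 < k1 := h0 k1 (by simp [hkt])
            rw [List.flatMap_cons, hB1, List.cons_append, List.dropWhile_cons,
              if_neg (by simp [hkg, hkf]; omega)]
      have htw : (fs ++ kt.flatMap B).takeWhile (fun g => key g == key f)
          = fs ++ (kt.flatMap B).takeWhile (fun g => key g == key f) :=
        pvTakeAll _ _ _ hall
      have hdw : (fs ++ kt.flatMap B).dropWhile (fun g => key g == key f)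
          = (kt.flatMap B).dropWhile (fun g => key g == key f) :=
        pvDropAll _ _ _ hall
      rw [List.flatMap_cons, hB0, List.cons_append, pvBatchRuns, htw, hdw, htw0, hdw0,
        ih ht (fun k hk => hkey k (by simp [hk])) (fun k hk => hne k (by simp [hk])),
        List.flatMap_cons, hB0]
      simp [pvBatches]

-- filtering commutes with the identity sort
theorem pvFilterSortedId (fl : List String) (p : String → Bool) :
    (PySem.List.sorted fl (fun x => x) false).filter p
      = PySem.List.sorted (fl.filter p) (fun x => x) false := by
  refine (PySem.List.sorted_id_eq_of_perm_of_pairwise _ _ ?_ ?_).symm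
  · exact (PySem.List.sorted_perm fl (fun x => x) false).filter p
  · exact (PySem.List.sorted_pairwise fl (fun x => x)).filter _

-- the distinct keys of the id-sorted list are the distinct keys of the list
theorem pvKeysSortedId (fl : List String) (key : String → Int) :
    PySem.List.sorted (PySem.Set.ofList ((PySem.List.sorted fl (fun x => x) false).map key)) (fun x => x) false
      = PySem.List.sorted (PySem.Set.ofList (fl.map key)) (fun x => x) false := by
  apply PySem.List.sorted_id_eq_of_perm_of_pairwise
  · have h1 : (PySem.List.sorted (PySem.Set.ofList (fl.map key)) (fun x => x) false).Nodup :=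
      ((PySem.List.sorted_perm _ _ _).nodup_iff).mpr (PySem.Set.nodup_ofList _)
    refine (List.perm_ext_iff_of_nodup h1 (PySem.Set.nodup_ofList _)).mpr ?_
    intro a
    simp only [PySem.List.mem_sorted, PySem.Set.mem_ofList, List.mem_map]
  · exact (PySem.List.sorted_ofList_pairwise_lt (fl.map key)).imp le_of_lt

-- ===== VERDICT (by name: the statement is the Claim_ definition above) =====
theorem fallback_layer_groups_py_spec : Claim_equal_fallback_layer_groups_py := by
  intro file_list layers batch_size _hdom _hpre
  unfold Spec_fallback_layer_groups_py
  simp only [fallback_layer_groups_py_alt]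
  rw [pvA_eq,
    pvStable (fun f => (PySem.Dict.mk layers).getD f 0)
      (PySem.List.sorted file_list (fun x => x) false),
    pvKeysSortedId,
    pvBatchRuns_flat _ _ _ _
      (PySem.List.sorted_ofList_pairwise_lt
        (file_list.map (fun f => (PySem.Dict.mk layers).getD f 0)))
      (fun k _ x hx => by simpa using (List.mem_filter.mp hx).2)
      (fun k hk => by
        have hk' : k ∈ file_list.map (fun f => (PySem.Dict.mk layers).getD f 0) :=
          (PySem.Set.mem_ofList _ _).mp ((PySem.List.mem_sorted _ _ _ _).mp hk)
        obtain ⟨f, hf, hfk⟩ := List.mem_map.mp hk'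
        exact List.ne_nil_of_mem (List.mem_filter.mpr
          ⟨(PySem.List.mem_sorted _ _ _ _).mpr hf, by simp [hfk]⟩))]
  refine pvFlatMapCongr _ _ _ ?_
  intro k _
  rw [pvFilterSortedId]
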